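-- pv_equiv track=rewrite | github.com/Deionus/aoc-2025 | day6.py | part1
-- ===== SOURCE A (Python) =====
-- def part1(input):
--     ops = [l for l in input[-1].split(" ") if len(l) > 0]
--     nums = [l.split(" ") for l in input[:-1]]
--     nums = [[int(n) for n in l if len(n) > 0] for l in nums]
--     grand_total = 0
--     for i in range(len(ops)):
--         op = ops[i]
--         total = 0 if op == "+" else 1
--         for l in nums:
--             if op == "+":
--                 total += l[i]
--             else:
--                 total *= l[i]
--
--         grand_total += total
--     return grand_total
-- ===== SOURCE B (Python) =====
-- def part1(input):
--     ops = [t for t in input[-1].split(" ") if len(t) > 0]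
--     acc = [0 if op == "+" else 1 for op in ops]
--     for line in input[:-1]:
--         row = [int(t) for t in line.split(" ") if len(t) > 0]
--         acc = [a + row[i] if ops[i] == "+" else a * row[i]
--                for i, a in enumerate(acc)]
--     return sum(acc)
-- ===== Notes on version B (the rewrite author's own statement) =====
-- stated objective: alternative
-- what changed: B makes a single pass over the rows, maintaining one running accumulator per operator (initialised 0 for '+', 1 for '*') that is updated element-wise from each row and summed at the end, instead of A's outer loop over operators that re-scans all rows once per column.
import Mathlib
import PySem

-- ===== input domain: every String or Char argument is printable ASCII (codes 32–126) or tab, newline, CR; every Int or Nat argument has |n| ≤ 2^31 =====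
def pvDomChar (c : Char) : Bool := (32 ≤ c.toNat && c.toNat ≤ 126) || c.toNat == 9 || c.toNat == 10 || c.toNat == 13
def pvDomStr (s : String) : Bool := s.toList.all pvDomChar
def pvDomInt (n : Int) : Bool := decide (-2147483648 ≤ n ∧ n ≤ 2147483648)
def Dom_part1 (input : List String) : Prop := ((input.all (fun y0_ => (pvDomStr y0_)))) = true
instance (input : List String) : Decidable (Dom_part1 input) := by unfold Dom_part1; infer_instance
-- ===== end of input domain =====

-- B traverses the data row by row in a single pass, keeping one running accumulator per
-- operator that each row updates element-wise, instead of A's outer loop over operators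
-- that re-scans all rows once per column (objective: alternative — loop interchange).

-- ===== PORT A =====
def part1 (input : List String) : Int :=
  let ops : List String :=
    ((PySem.Str.split? (PySem.List.pyGetD input (-1) "") " ").getD []).filter
      (fun l => 0 < PySem.Str.len l)
  let nums0 : List (List String) :=
    (PySem.List.slice input none (some (-1))).map (fun l => (PySem.Str.split? l " ").getD [])
  let nums : List (List Int) :=
    nums0.map (fun l =>
      (l.filter (fun n => 0 < PySem.Str.len n)).map (fun n => (PySem.Int.ofStr? n).getD 0))
  (PySem.List.pyRange 0 (PySem.List.len ops) 1).foldl (fun grand i =>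
    let op := PySem.List.pyGetD ops i ""
    let total : Int := if op = "+" then 0 else 1
    grand + nums.foldl (fun total l =>
      if op = "+" then total + PySem.List.pyGetD l i 0
      else total * PySem.List.pyGetD l i 0) total) 0

-- ===== PORT B =====
def part1_alt (input : List String) : Int :=
  let ops : List String :=
    ((PySem.Str.split? (PySem.List.pyGetD input (-1) "") " ").getD []).filter
      (fun t => 0 < PySem.Str.len t)
  let acc0 : List Int := ops.map (fun op => if op = "+" then (0 : Int) else 1)
  let accF : List Int :=
    (PySem.List.slice input none (some (-1))).foldl (fun acc line =>
      let row : List Int :=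
        (((PySem.Str.split? line " ").getD []).filter (fun t => 0 < PySem.Str.len t)).map
          (fun t => (PySem.Int.ofStr? t).getD 0)
      (PySem.List.enumerate acc 0).map (fun ia =>
        if PySem.List.pyGetD ops ia.1 "" = "+" then ia.2 + PySem.List.pyGetD row ia.1 0
        else ia.2 * PySem.List.pyGetD row ia.1 0)) acc0
  accF.sum

-- ===== PRECONDITION & SPEC =====
-- Pre_ excludes exactly the inputs where the Python A raises: empty input (IndexError on
-- input[-1]), a non-integer token in a number row (ValueError from int), or a number row
-- with fewer entries than there are operators (IndexError on l[i]).
def Pre_part1 (input : List String) : Prop :=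
  input ≠ [] ∧
  ∀ s ∈ input.dropLast,
    (∀ tok ∈ ((PySem.Str.split? s " ").getD []).filter (fun t => 0 < PySem.Str.len t),
        (PySem.Int.ofStr? tok).isSome) ∧
    (((PySem.Str.split? (input.getLast?.getD "") " ").getD []).filter
        (fun t => 0 < PySem.Str.len t)).length ≤
      (((PySem.Str.split? s " ").getD []).filter (fun t => 0 < PySem.Str.len t)).length
instance (input : List String) : Decidable (Pre_part1 input) := by
  unfold Pre_part1; infer_instance

def pvWitness_part1 : List String := ["1 2 3", "4 5 6", "+ * +"]

def Spec_part1 (input : List String) (out : Int) : Prop := out = part1_alt input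
instance (input : List String) (out : Int) : Decidable (Spec_part1 input out) := by
  unfold Spec_part1; infer_instance

-- ===== CLAIM (what is proved, stated in full; the proofs are below) =====
def Claim_equal_part1 : Prop :=
  ∀ (input : List String), Dom_part1 input → Pre_part1 input → Spec_part1 input (part1 input)

-- ===== LEMMAS AND PROOFS =====

-- one element-wise vector update on a table indexed by range(n) is a range-indexed table again
lemma vstep_map_range (n : Nat) (f : Int → Int) (g : Int → Int → Int) :
    (PySem.List.enumerate ((PySem.List.pyRange 0 n 1).map f) 0).map
        (fun ia => g ia.1 ia.2)
      = (PySem.List.pyRange 0 n 1).map (fun i => g i (f i)) := by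
  rw [PySem.List.enumerate_eq_map_pyRange ((PySem.List.pyRange 0 n 1).map f) 0]
  have hlen : PySem.List.len ((PySem.List.pyRange 0 (n : Int) 1).map f) = (n : Int) := by
    simp [PySem.List.len_eq, PySem.List.length_pyRange_one]
  rw [hlen, List.map_map]
  apply List.map_congr_left
  intro i hi
  rcases (PySem.List.mem_pyRange_one).1 hi with ⟨h0, hn⟩
  simp [PySem.List.pyGetD_map_pyRange_of_nonneg f n i 0 h0 (by simpa using hn)]

-- loop interchange: folding rows over a vector of per-index accumulators equals,
-- per index, folding that index's scalar recurrence over the rows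
lemma foldl_vstep (nums : List (List Int)) (n : Nat) (g : Int → Int → Int → Int)
    (f : Int → Int) :
    nums.foldl (fun acc row =>
        (PySem.List.enumerate acc 0).map (fun ia => g ia.1 ia.2 (PySem.List.pyGetD row ia.1 0)))
      ((PySem.List.pyRange 0 n 1).map f)
    = (PySem.List.pyRange 0 n 1).map
        (fun i => nums.foldl (fun t row => g i t (PySem.List.pyGetD row i 0)) (f i)) := by
  induction nums generalizing f with
  | nil => simp
  | cons row rest ih =>
    simp only [List.foldl_cons]
    rw [vstep_map_range n f (fun i a => g i a (PySem.List.pyGetD row i 0)),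
      ih (fun i => g i (f i) (PySem.List.pyGetD row i 0))]

-- ===== VERDICT (by name: the statement is the Claim_ definition above) =====
theorem part1_spec : Claim_equal_part1 := by
  intro input _ _
  unfold Spec_part1 part1 part1_alt
  rw [PySem.List.foldl_add]
  simp only [zero_add, PySem.List.len_eq]
  set ops : List String :=
    ((PySem.Str.split? (PySem.List.pyGetD input (-1) "") " ").getD []).filter
      (fun t => 0 < PySem.Str.len t) with hops
  set g : String → List String := fun l => (PySem.Str.split? l " ").getD [] with hg
  set f : List String → List Int := fun l =>
    (l.filter (fun n => 0 < PySem.Str.len n)).map (fun n => (PySem.Int.ofStr? n).getD 0) with hf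
  have hacc0 : ops.map (fun op => if op = "+" then (0 : Int) else 1)
      = (PySem.List.pyRange 0 ops.length 1).map
          (fun i => if PySem.List.pyGetD ops i "" = "+" then (0 : Int) else 1) := by
    conv_lhs => rw [← PySem.List.map_pyGetD_pyRange_zero ops ""]
    rw [List.map_map]
    simp only [PySem.List.len_eq]
    rfl
  have hB :
      ((PySem.List.slice input none (some (-1))).foldl (fun acc line =>
          (PySem.List.enumerate acc 0).map (fun ia =>
            if PySem.List.pyGetD ops ia.1 "" = "+" then
              ia.2 + PySem.List.pyGetD (f (g line)) ia.1 0
            else ia.2 * PySem.List.pyGetD (f (g line)) ia.1 0))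
        (ops.map (fun op => if op = "+" then (0 : Int) else 1)))
      = (((PySem.List.slice input none (some (-1))).map g).map f).foldl (fun acc row =>
          (PySem.List.enumerate acc 0).map (fun ia =>
            if PySem.List.pyGetD ops ia.1 "" = "+" then ia.2 + PySem.List.pyGetD row ia.1 0
            else ia.2 * PySem.List.pyGetD row ia.1 0))
        (ops.map (fun op => if op = "+" then (0 : Int) else 1)) := by
    rw [List.foldl_map, List.foldl_map]
  rw [hB, hacc0,
    foldl_vstep (((PySem.List.slice input none (some (-1))).map g).map f) ops.length
      (fun i t x => if PySem.List.pyGetD ops i "" = "+" then t + x else t * x)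
      (fun i => if PySem.List.pyGetD ops i "" = "+" then (0 : Int) else 1)]
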